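-- pv_equiv track=rewrite | github.com/Anish-Shobith/sjec-30-days-of-code | day-24/code.py | calculate_key
-- ===== SOURCE A (Python) =====
-- from collections import Counter
--
-- def calculate_key(c, p):
--     c_freq = Counter(c)
--     p_freq = Counter(p)
--     k = {}
--     for c_char, c_count in c_freq.items():
--         for p_char, p_count in p_freq.items():
--             if c_count == p_count:
--                 k[c_char] = p_char
--                 p_freq[p_char] = -1  # Mark as used
--                 break
--     return k
-- ===== SOURCE B (Python) =====
-- from collections import Counter
--
-- def calculate_key(c, p):
--     # Index p-characters by frequency into insertion-ordered queues,
--     # then pop the front queue entry for each c-character's frequency.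
--     queues = {}
--     for p_char, p_count in Counter(p).items():
--         queues.setdefault(p_count, []).append(p_char)
--     k = {}
--     for c_char, c_count in Counter(c).items():
--         q = queues.get(c_count)
--         if q:
--             k[c_char] = q.pop(0)
--     return k
-- ===== Notes on version B (the rewrite author's own statement) =====
-- stated objective: alternative
-- what changed: Instead of rescanning p's counter for every c-character (marking used entries with -1), B buckets p's characters into per-frequency insertion-ordered queues once and pops the front queue entry for each c-character's frequency.
import Mathlib
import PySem

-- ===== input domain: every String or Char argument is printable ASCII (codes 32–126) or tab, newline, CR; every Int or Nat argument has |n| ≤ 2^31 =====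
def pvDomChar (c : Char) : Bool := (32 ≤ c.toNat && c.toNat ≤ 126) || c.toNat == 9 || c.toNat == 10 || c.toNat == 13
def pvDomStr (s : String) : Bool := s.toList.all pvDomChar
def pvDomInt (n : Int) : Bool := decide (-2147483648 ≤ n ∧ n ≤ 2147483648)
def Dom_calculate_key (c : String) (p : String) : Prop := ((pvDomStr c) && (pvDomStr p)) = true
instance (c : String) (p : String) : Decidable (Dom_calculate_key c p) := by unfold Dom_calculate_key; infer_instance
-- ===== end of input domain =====

-- B replaces A's rescans of p's counter by per-frequency queues built once (a different algorithm); return value proved equal everywhere.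

-- ===== PORT A =====
-- inner 'for p_char, p_count in p_freq.items(): if c_count == p_count: … break'
def pvFindMatch (items : List (Char × Int)) (cnt : Int) : Option Char :=
  match items with
  | [] => none
  | (pc, pcnt) :: rest => if pcnt = cnt then some pc else pvFindMatch rest cnt

-- outer 'for c_char, c_count in c_freq.items(): …' (marking p_freq[p_char] = -1 on a match)
def pvALoop (cItems : List (Char × Int)) (pFreq : PySem.Dict Char Int)
    (k : PySem.Dict String String) : PySem.Dict String String :=
  match cItems with
  | [] => k
  | (cc, ccnt) :: rest =>
    match pvFindMatch pFreq.items ccnt with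
    | some pc => pvALoop rest (pFreq.insert pc (-1)) (k.insert (String.ofList [cc]) (String.ofList [pc]))
    | none => pvALoop rest pFreq k

def calculate_key (c : String) (p : String) : List (String × String) :=
  (pvALoop (PySem.Dict.counter c.toList).items (PySem.Dict.counter p.toList)
    PySem.Dict.empty).items

-- ===== PORT B =====
-- 'for p_char, p_count in Counter(p).items(): queues.setdefault(p_count, []).append(p_char)'
def pvQueues (pItems : List (Char × Int)) : PySem.Dict Int (List Char) :=
  pItems.foldl (fun d pr => d.modify pr.2 [] (· ++ [pr.1])) PySem.Dict.empty

-- 'for c_char, c_count in Counter(c).items(): q = queues.get(c_count); if q: k[c_char] = q.pop(0)'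
def pvBLoop (cItems : List (Char × Int)) (queues : PySem.Dict Int (List Char))
    (k : PySem.Dict String String) : PySem.Dict String String :=
  match cItems with
  | [] => k
  | (cc, ccnt) :: rest =>
    match queues.getD ccnt [] with
    | [] => pvBLoop rest queues k
    | pc :: q => pvBLoop rest (queues.insert ccnt q) (k.insert (String.ofList [cc]) (String.ofList [pc]))

def calculate_key_alt (c : String) (p : String) : List (String × String) :=
  (pvBLoop (PySem.Dict.counter c.toList).items
    (pvQueues (PySem.Dict.counter p.toList).items) PySem.Dict.empty).items

-- ===== PRECONDITION & SPEC =====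
def Spec_calculate_key (c : String) (p : String) (out : List (String × String)) : Prop := out = calculate_key_alt c p
instance (c : String) (p : String) (out : List (String × String)) : Decidable (Spec_calculate_key c p out) := by unfold Spec_calculate_key; infer_instance

-- ===== CLAIM (what is proved, stated in full; the proofs are below) =====
def Claim_equal_calculate_key : Prop := ∀ (c : String) (p : String), Dom_calculate_key c p → Spec_calculate_key c p (calculate_key c p)

-- ===== LEMMAS AND PROOFS =====

-- A's inner scan finds exactly the head of the queue of equal-count p-entries.
theorem pvFindMatch_eq (items : List (Char × Int)) (cnt : Int) :
    pvFindMatch items cnt = ((items.filter (fun pr => pr.2 == cnt)).map (·.1)).head? := by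
  induction items with
  | nil => rfl
  | cons hd tl ih =>
    obtain ⟨pc, pcnt⟩ := hd
    by_cases h : pcnt = cnt
    · simp [pvFindMatch, h]
    · simp [pvFindMatch, h, ih]

-- the main loop lemma: the per-count queues track exactly the unmarked p-entries
theorem loop_eq (cItems : List (Char × Int)) (pFreq : PySem.Dict Char Int)
    (queues : PySem.Dict Int (List Char)) (k : PySem.Dict String String)
    (hpos : ∀ pr ∈ cItems, 0 < pr.2)
    (hnodup : pFreq.keys.Nodup)
    (hinv : ∀ n : Int, 0 < n →
      queues.getD n [] = (pFreq.items.filter (fun pr => pr.2 == n)).map (·.1)) :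
    pvALoop cItems pFreq k = pvBLoop cItems queues k := by
  induction cItems generalizing pFreq queues k with
  | nil => rfl
  | cons hd rest ih =>
    obtain ⟨cc, ccnt⟩ := hd
    have hc : 0 < ccnt := hpos (cc, ccnt) (List.mem_cons_self ..)
    have hrest : ∀ pr ∈ rest, 0 < pr.2 := fun pr hm => hpos pr (List.mem_cons_of_mem _ hm)
    rw [pvALoop, pvBLoop, pvFindMatch_eq, ← hinv ccnt hc]
    cases hq : queues.getD ccnt [] with
    | nil => exact ih pFreq queues _ hrest hnodup hinv
    | cons pc q =>
      -- the queue head pc is the first p-entry whose count is ccnt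
      have hfil : (pFreq.items.filter (fun pr => pr.2 == ccnt)).map (·.1) = pc :: q := by
        rw [← hinv ccnt hc, hq]
      obtain ⟨a, as, hfe, ha1, hq'⟩ :
          ∃ a as, pFreq.items.filter (fun pr => pr.2 == ccnt) = a :: as ∧
            a.1 = pc ∧ as.map (·.1) = q := by
        cases hfe : pFreq.items.filter (fun pr => pr.2 == ccnt) with
        | nil => simp [hfe] at hfil
        | cons a as =>
          refine ⟨a, as, rfl, ?_, ?_⟩ <;> · rw [hfe] at hfil; simp at hfil; tauto
      have ha2 : a.2 = ccnt := by
        have hmem : a ∈ pFreq.items.filter (fun pr => pr.2 == ccnt) := by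
          rw [hfe]; exact List.mem_cons_self ..
        simpa using List.of_mem_filter hmem
      obtain ⟨l1, l2, hsplit, hl1, _, hl2⟩ := List.filter_eq_cons_iff.mp hfe
      have haeq : a = (pc, ccnt) := by rw [← ha1, ← ha2]
      subst haeq
      -- pc does not occur as a key in l1 or l2 (keys stay unique)
      have hnd : (l1.map (·.1) ++ pc :: l2.map (·.1)).Nodup := by
        have h0 : (pFreq.items.map (·.1)).Nodup := hnodup
        rw [hsplit] at h0; simpa using h0
      have hpc1 : pc ∉ l1.map (·.1) := fun hm =>
        (List.disjoint_of_nodup_append hnd) hm (List.mem_cons_self ..)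
      have hpc2 : pc ∉ l2.map (·.1) :=
        (List.nodup_cons.mp (List.Nodup.of_append_right hnd)).1
      -- marking: p_freq[pc] = -1 rewrites the split list in place
      have hcont : pFreq.contains pc = true := by
        rw [PySem.Dict.contains_iff_mem_keys]
        exact PySem.Dict.mem_keys_of_mem_items pFreq
          (p := (pc, ccnt)) (by rw [hsplit]; simp)
      have hitems : (pFreq.insert pc (-1)).items = l1 ++ ((pc, -1) : Char × Int) :: l2 := by
        rw [PySem.Dict.items_insert_of_contains pFreq (-1) hcont, hsplit]
        have gid : ∀ (l : List (Char × Int)), pc ∉ l.map (·.1) →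
            l.map (fun p => if (p.1 == pc) = true then (pc, (-1 : Int)) else p) = l := by
          intro l hl
          have hx : ∀ x ∈ l,
              (fun p : Char × Int => if (p.1 == pc) = true then (pc, (-1 : Int)) else p) x
                = id x := by
            intro x hxm
            have : x.1 ≠ pc := fun he => hl (he ▸ List.mem_map_of_mem hxm)
            simp [this]
          rw [List.map_congr_left hx, List.map_id]
        simp only [List.map_append, List.map_cons, gid l1 hpc1, gid l2 hpc2]
        simp
      have hnodup' : (pFreq.insert pc (-1)).keys.Nodup :=
        PySem.Dict.nodup_keys_insert _ _ _ hnodup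
      -- the invariant survives the step
      have hinv' : ∀ n : Int, 0 < n →
          (queues.insert ccnt q).getD n [] =
            ((pFreq.insert pc (-1)).items.filter (fun pr => pr.2 == n)).map (·.1) := by
        intro n hn
        rw [hitems, PySem.Dict.getD_insert]
        by_cases hne : n = ccnt
        · subst hne
          have hl1n : l1.filter (fun pr => pr.2 == n) = [] :=
            List.filter_eq_nil_iff.mpr hl1
          simp [List.filter_append, hl1n, show ¬((-1 : Int) = n) by omega, ← hq', hl2]
        · rw [if_neg hne, hinv n hn, hsplit]
          simp [List.filter_append, show ¬((-1 : Int) = n) by omega,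
            show ¬(ccnt = n) by omega]
      simp only [List.head?_cons]
      exact ih _ _ _ hrest hnodup' hinv'

-- every counter value is positive
theorem counter_items_pos (xs : List Char) :
    ∀ pr ∈ (PySem.Dict.counter xs).items, 0 < pr.2 := by
  intro pr hpr
  rw [PySem.Dict.items_counter] at hpr
  obtain ⟨ch, hch, rfl⟩ := List.mem_map.mp hpr
  have hmem : ch ∈ xs := (PySem.Set.mem_ofList _ _).mp hch
  have : 0 < xs.count ch := List.count_pos_iff.mpr hmem
  simpa using this

-- B's prepass groups p's counter entries by count, fronts first
theorem queues_getD (pItems : List (Char × Int)) (n : Int) :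
    (pvQueues pItems).getD n [] = (pItems.filter (fun pr => pr.2 == n)).map (·.1) := by
  have hfold : pItems.foldl (fun d pr => d.modify pr.2 [] (· ++ [pr.1])) PySem.Dict.empty
      = (pItems.map (fun pr => (pr.2, pr.1))).foldl
          (fun d p => d.modify p.1 [] (· ++ [p.2])) PySem.Dict.empty := by
    rw [List.foldl_map]
  unfold pvQueues
  rw [hfold, PySem.Dict.getD_foldl_modify_append]
  simp [List.filter_map, Function.comp_def]

-- ===== VERDICT (by name: the statement is the Claim_ definition above) =====
theorem calculate_key_spec : Claim_equal_calculate_key := by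
  intro c p _
  unfold Spec_calculate_key calculate_key calculate_key_alt
  congr 1
  exact loop_eq _ _ _ _ (counter_items_pos c.toList)
    (PySem.Dict.nodup_keys_counter p.toList)
    (fun n _ => queues_getD _ n)
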